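-- pv_equiv track=rewrite | github.com/alex-petrov-vt/advent-of-code-2021 | day10.py | is_incomplete
-- ===== SOURCE A (Python) =====
-- OPEN_CHAR = ["(", "[", "{", "<"]
--
-- VALID_PAIRS = {"(": ")", "[": "]", "{": "}", "<": ">"}
--
-- def is_incomplete(line):
--     stack = []
--     for curr_char in line:
--         if curr_char in OPEN_CHAR:
--             stack.append(curr_char)
--         else:
--             if len(stack) == 0:
--                 return False
--             open_char = stack.pop()
--             if not is_valid_pair(open_char, curr_char):
--                 return False
--     return len(stack) > 0
--
-- def is_valid_pair(open_char, close_char):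
--     return close_char == VALID_PAIRS[open_char]
-- ===== SOURCE B (Python) =====
-- def is_incomplete(line):
--     s = line
--     while True:
--         t = s.replace("()", "").replace("[]", "").replace("{}", "").replace("<>", "")
--         if t == s:
--             break
--         s = t
--     return len(s) > 0 and all(c in "([{<" for c in s)
-- ===== Notes on version B (the rewrite author's own statement) =====
-- stated objective: alternative
-- what changed: Replaces the single stack pass with repeated deletion of adjacent matched bracket pairs via str.replace until a fixed point, then classifies the irreducible remainder: incomplete iff it is nonempty and consists only of opening brackets.
import Mathlib
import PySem

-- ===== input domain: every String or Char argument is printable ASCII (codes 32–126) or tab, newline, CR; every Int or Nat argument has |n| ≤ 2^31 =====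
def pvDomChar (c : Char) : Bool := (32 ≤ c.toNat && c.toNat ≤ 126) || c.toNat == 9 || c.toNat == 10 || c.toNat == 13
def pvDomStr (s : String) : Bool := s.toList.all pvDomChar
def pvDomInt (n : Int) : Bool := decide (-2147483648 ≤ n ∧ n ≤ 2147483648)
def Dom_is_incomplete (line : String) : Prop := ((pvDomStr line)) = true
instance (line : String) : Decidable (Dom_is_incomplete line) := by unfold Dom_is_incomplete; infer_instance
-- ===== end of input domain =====

-- B replaces A's single stack pass by repeated deletion of adjacent matched pairs (str.replace
-- to a fixed point) and classifies the irreducible remainder; alternative decomposition, not faster.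


-- ===== PORT A =====
def OPEN_CHAR : List Char := ['(', '[', '{', '<']

def VALID_PAIRS : PySem.Dict Char Char := PySem.Dict.ofList [('(', ')'), ('[', ']'), ('{', '}'), ('<', '>')]

-- is_valid_pair: VALID_PAIRS[open_char] raises KeyError only if open_char is not a key, which is
-- unreachable in A (the stack only ever holds members of OPEN_CHAR); `none → false` marks that spot.
def is_valid_pair (open_char close_char : Char) : Bool :=
  match PySem.Dict.get? VALID_PAIRS open_char with
  | some v => close_char == v
  | none => false

-- loop state: `none` = an early `return False` has fired; `some stack` = the running stack
-- (append at the end, pop from the end, exactly as A's list).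
def aStep (st : Option (List Char)) (curr_char : Char) : Option (List Char) :=
  match st with
  | none => none
  | some stack =>
    if OPEN_CHAR.contains curr_char then some (stack ++ [curr_char])
    else
      match stack.getLast? with
      | none => none          -- len(stack) == 0 : return False
      | some open_char =>
        if is_valid_pair open_char curr_char then some stack.dropLast
        else none             -- invalid pair : return False

def is_incomplete (line : String) : Bool :=
  match line.toList.foldl aStep (some []) with
  | none => false
  | some stack => decide (stack.length > 0)

-- ===== PORT B =====
def bRepl (o c : Char) (s : List Char) : List Char := PySem.Chars.replace s [o, c] []

def reduceOnce (s : List Char) : List Char :=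
  bRepl '<' '>' (bRepl '{' '}' (bRepl '[' ']' (bRepl '(' ')' s)))

-- Python's `while True` loop; the fuel `length + 1` only makes it total (each non-fixpoint
-- iteration strictly shortens the string, so the fuel is never exhausted).
def reduceLoop : Nat → List Char → List Char
  | 0, s => s
  | n + 1, s => let t := reduceOnce s; if t = s then s else reduceLoop n t

def is_incomplete_alt (line : String) : Bool :=
  let r := reduceLoop (line.toList.length + 1) line.toList
  decide (r.length > 0) && r.all (fun c => "([{<".toList.contains c)

-- ===== PRECONDITION & SPEC =====
def Spec_is_incomplete (line : String) (out : Bool) : Prop := out = is_incomplete_alt line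
instance (line : String) (out : Bool) : Decidable (Spec_is_incomplete line out) := by unfold Spec_is_incomplete; infer_instance

-- ===== CLAIM (what is proved, stated in full; the proofs are below) =====
def Claim_equal_is_incomplete : Prop := ∀ (line : String), Dom_is_incomplete line → Spec_is_incomplete line (is_incomplete line)

-- ===== LEMMAS AND PROOFS =====

-- simple structural model of Python's  s.replace(oc, "")  for a two-char pattern
def myRepl (o c : Char) : List Char → List Char
  | a :: b :: t => if a = o ∧ b = c then myRepl o c t else a :: myRepl o c (b :: t)
  | l => l

theorem replace_go_eq (o c : Char) :
    ∀ fuel l acc, l.length ≤ fuel →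
      PySem.Chars.replace.go [o, c] [] fuel l acc = acc.reverse ++ myRepl o c l := by
  intro fuel
  induction fuel with
  | zero =>
    intro l acc h
    have hl : l = [] := List.eq_nil_of_length_eq_zero (Nat.le_zero.mp h)
    subst hl
    simp [PySem.Chars.replace.go, myRepl]
  | succ n ih =>
    intro l acc h
    cases l with
    | nil => simp [PySem.Chars.replace.go, myRepl]
    | cons a t =>
      cases t with
      | nil =>
        have hpre : ([o, c].isPrefixOf [a]) = false := by
          simp [List.isPrefixOf]
        cases n <;> simp [PySem.Chars.replace.go, hpre, myRepl]
      | cons b t' =>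
        by_cases hab : a = o ∧ b = c
        · obtain ⟨ha, hb⟩ := hab
          subst ha; subst hb
          have hpre : ([a, b].isPrefixOf (a :: b :: t')) = true := by
            simp [List.isPrefixOf]
          have ht' : t'.length ≤ n := by
            simp [List.length_cons] at h; omega
          simp only [PySem.Chars.replace.go, hpre, if_pos]
          rw [show (List.drop [a, b].length (a :: b :: t')) = t' by simp]
          rw [show (([] : List Char).reverse ++ acc) = acc by simp]
          rw [ih t' acc ht']
          simp [myRepl]
        · have hpre : ([o, c].isPrefixOf (a :: b :: t')) = false := by
            simp [List.isPrefixOf]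
            intro ho hc
            exact absurd ⟨ho.symm, hc.symm⟩ hab
          have ht : (b :: t').length ≤ n := by
            simp [List.length_cons] at h ⊢; omega
          simp only [PySem.Chars.replace.go, hpre, Bool.false_eq_true, if_false]
          rw [ih (b :: t') (a :: acc) ht]
          simp [myRepl, hab]

theorem bRepl_eq_myRepl (o c : Char) (s : List Char) : bRepl o c s = myRepl o c s := by
  unfold bRepl PySem.Chars.replace
  rw [if_neg (by simp)]
  rw [replace_go_eq o c s.length s [] (le_refl _)]
  simp

theorem myRepl_len_le (o c : Char) (s : List Char) : (myRepl o c s).length ≤ s.length := by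
  fun_induction myRepl o c s <;> simp_all <;> omega

theorem myRepl_fix_or_lt (o c : Char) (s : List Char) :
    myRepl o c s = s ∨ (myRepl o c s).length < s.length := by
  fun_induction myRepl o c s with
  | case1 a b t hab ih =>
    right
    have := myRepl_len_le o c t
    simp [List.length_cons]; omega
  | case2 a b t hab ih =>
    rcases ih with h | h
    · left; rw [h]
    · right; simp [List.length_cons] at h ⊢; omega
  | case3 l h1 => left; rfl

-- a fixed point of myRepl has no adjacent (o, c) pair
theorem myRepl_fix_no_adj (o c : Char) :
    ∀ x y, myRepl o c (x ++ o :: c :: y) ≠ x ++ o :: c :: y := by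
  intro x
  induction x with
  | nil =>
    intro y h
    have hlen := myRepl_len_le o c y
    have : myRepl o c ([] ++ o :: c :: y) = myRepl o c y := by simp [myRepl]
    rw [this] at h
    have := congrArg List.length h
    simp [List.length_cons] at this; omega
  | cons d x' ih =>
    intro y h
    cases he : x' ++ o :: c :: y with
    | nil => simp at he
    | cons e t =>
      rw [List.cons_append, he] at h
      by_cases hde : d = o ∧ e = c
      · have : myRepl o c (d :: e :: t) = myRepl o c t := by simp [myRepl, hde]
        rw [this] at h
        have hlen := myRepl_len_le o c t
        have := congrArg List.length h
        simp [List.length_cons] at this; omega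
      · have : myRepl o c (d :: e :: t) = d :: myRepl o c (e :: t) := by
          simp [myRepl, hde]
        rw [this] at h
        injection h with h1 h2
        rw [← he] at h2
        exact ih y h2

def Irr (s : List Char) : Prop :=
  myRepl '(' ')' s = s ∧ myRepl '[' ']' s = s ∧ myRepl '{' '}' s = s ∧ myRepl '<' '>' s = s

theorem reduceOnce_eq (s : List Char) :
    reduceOnce s =
      myRepl '<' '>' (myRepl '{' '}' (myRepl '[' ']' (myRepl '(' ')' s))) := by
  unfold reduceOnce
  rw [bRepl_eq_myRepl, bRepl_eq_myRepl, bRepl_eq_myRepl, bRepl_eq_myRepl]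

theorem reduceOnce_cases (s : List Char) :
    (reduceOnce s = s ∧ Irr s) ∨ (reduceOnce s).length < s.length := by
  rw [reduceOnce_eq]
  rcases myRepl_fix_or_lt '(' ')' s with h1 | h1
  · rw [h1]
    rcases myRepl_fix_or_lt '[' ']' s with h2 | h2
    · rw [h2]
      rcases myRepl_fix_or_lt '{' '}' s with h3 | h3
      · rw [h3]
        rcases myRepl_fix_or_lt '<' '>' s with h4 | h4
        · rw [h4]; exact Or.inl ⟨rfl, h1, h2, h3, h4⟩
        · exact Or.inr h4
      · right
        have := myRepl_len_le '<' '>' (myRepl '{' '}' s)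
        omega
    · right
      have := myRepl_len_le '{' '}' (myRepl '[' ']' s)
      have := myRepl_len_le '<' '>' (myRepl '{' '}' (myRepl '[' ']' s))
      omega
  · right
    have := myRepl_len_le '[' ']' (myRepl '(' ')' s)
    have := myRepl_len_le '{' '}' (myRepl '[' ']' (myRepl '(' ')' s))
    have := myRepl_len_le '<' '>' (myRepl '{' '}' (myRepl '[' ']' (myRepl '(' ')' s)))
    omega

theorem reduceLoop_fix (n : Nat) : ∀ s, s.length < n → Irr (reduceLoop n s) := by
  induction n with
  | zero => intro s h; omega
  | succ n ih =>
    intro s h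
    simp only [reduceLoop]
    by_cases hf : reduceOnce s = s
    · rw [if_pos hf]
      rcases reduceOnce_cases s with ⟨_, hirr⟩ | hlt
      · exact hirr
      · rw [hf] at hlt; omega
    · rw [if_neg hf]
      apply ih
      rcases reduceOnce_cases s with ⟨he, _⟩ | hlt
      · exact absurd he hf
      · omega

theorem foldl_aStep_none (s : List Char) : s.foldl aStep none = none := by
  induction s with
  | nil => rfl
  | cons a t ih => simp [List.foldl_cons, aStep, ih]

theorem step_step (st : Option (List Char)) (o c : Char)
    (ho : OPEN_CHAR.contains o = true) (hc : OPEN_CHAR.contains c = false)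
    (hv : is_valid_pair o c = true) :
    aStep (aStep st o) c = st := by
  cases st with
  | none => rfl
  | some stack =>
    have ho' : o ∈ OPEN_CHAR := by simpa using ho
    have hc' : c ∉ OPEN_CHAR := by simpa using hc
    simp [aStep, ho', hc', hv]

theorem fold_myRepl (o c : Char)
    (ho : OPEN_CHAR.contains o = true) (hc : OPEN_CHAR.contains c = false)
    (hv : is_valid_pair o c = true) :
    ∀ s st, (myRepl o c s).foldl aStep st = s.foldl aStep st := by
  intro s
  fun_induction myRepl o c s with
  | case1 a b t hab ih =>
    intro st
    obtain ⟨ha, hb⟩ := hab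
    subst ha; subst hb
    rw [ih st]
    simp only [List.foldl_cons]
    rw [step_step st a b ho hc hv]
  | case2 a b t hab ih =>
    intro st
    simp only [List.foldl_cons] at *
    rw [ih]
  | case3 l h1 => intro st; rfl

theorem fold_reduceOnce (s : List Char) (st : Option (List Char)) :
    (reduceOnce s).foldl aStep st = s.foldl aStep st := by
  rw [reduceOnce_eq]
  rw [fold_myRepl '<' '>' (by decide) (by decide) (by decide)]
  rw [fold_myRepl '{' '}' (by decide) (by decide) (by decide)]
  rw [fold_myRepl '[' ']' (by decide) (by decide) (by decide)]
  rw [fold_myRepl '(' ')' (by decide) (by decide) (by decide)]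

theorem fold_reduceLoop (n : Nat) : ∀ s st, (reduceLoop n s).foldl aStep st = s.foldl aStep st := by
  induction n with
  | zero => intro s st; rfl
  | succ n ih =>
    intro s st
    simp only [reduceLoop]
    by_cases hf : reduceOnce s = s
    · rw [if_pos hf]
    · rw [if_neg hf, ih, fold_reduceOnce]

theorem valid_pair_adj (a b : Char) (hv : is_valid_pair a b = true) :
    (a = '(' ∧ b = ')') ∨ (a = '[' ∧ b = ']') ∨ (a = '{' ∧ b = '}') ∨ (a = '<' ∧ b = '>') := by
  unfold is_valid_pair at hv
  rw [show VALID_PAIRS = PySem.Dict.mk [('(', ')'), ('[', ']'), ('{', '}'), ('<', '>')] from by decide] at hv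
  simp only [PySem.Dict.get?_mk_cons] at hv
  by_cases h1 : ('(' == a)
  · simp [h1] at hv
    exact Or.inl ⟨(beq_iff_eq.mp h1).symm, hv⟩
  · rw [if_neg (by simpa using h1)] at hv
    by_cases h2 : ('[' == a)
    · simp [h2] at hv
      exact Or.inr (Or.inl ⟨(beq_iff_eq.mp h2).symm, hv⟩)
    · rw [if_neg (by simpa using h2)] at hv
      by_cases h3 : ('{' == a)
      · simp [h3] at hv
        exact Or.inr (Or.inr (Or.inl ⟨(beq_iff_eq.mp h3).symm, hv⟩))
      · rw [if_neg (by simpa using h3)] at hv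
        by_cases h4 : ('<' == a)
        · simp [h4] at hv
          exact Or.inr (Or.inr (Or.inr ⟨(beq_iff_eq.mp h4).symm, hv⟩))
        · rw [if_neg (by simpa using h4)] at hv
          simp [PySem.Dict.get?] at hv

-- on an irreducible string, A's stack pass agrees with B's remainder classification
theorem irr_gen (s : List Char) :
    ∀ u, (∀ a ∈ u, OPEN_CHAR.contains a = true) → Irr (u ++ s) →
      (match s.foldl aStep (some u) with
        | none => false
        | some stack => decide (stack.length > 0)) =
      (decide ((u ++ s).length > 0) && (u ++ s).all (fun x => OPEN_CHAR.contains x)) := by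
  induction s with
  | nil =>
    intro u hu _
    simp only [List.foldl_nil, List.append_nil]
    have : u.all (fun x => OPEN_CHAR.contains x) = true := by
      simp only [List.all_eq_true]; exact fun a ha => hu a ha
    rw [this]
    cases u <;> simp
  | cons b t ih =>
    intro u hu hirr
    by_cases hb : OPEN_CHAR.contains b = true
    · simp only [List.foldl_cons, aStep, hb, if_pos]
      have h2 := ih (u ++ [b]) (by
        intro a ha
        rcases List.mem_append.mp ha with h | h
        · exact hu a h
        · simp at h; subst h; exact hb) (by
        rw [List.append_assoc]; simpa using hirr)
      rw [h2]
      simp [List.append_assoc]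
    · -- b is not an opener: A returns False here, and B's all-openers test fails
      have hb' : b ∉ OPEN_CHAR := by simpa using hb
      have hall : (u ++ b :: t).all (fun x => OPEN_CHAR.contains x) = false := by
        refine List.all_eq_false.mpr ⟨b, by simp, ?_⟩
        simpa using hb'
      rw [hall, Bool.and_false]
      simp only [List.foldl_cons]
      rcases List.eq_nil_or_concat u with rfl | ⟨u', a, rfl⟩
      · have : aStep (some []) b = none := by simp [aStep, hb']
        rw [this, foldl_aStep_none]
      · have hvst : is_valid_pair a b = false := by
          by_contra hv
          rw [Bool.not_eq_false] at hv
          rcases valid_pair_adj a b hv with ⟨rfl, rfl⟩ | ⟨rfl, rfl⟩ | ⟨rfl, rfl⟩ | ⟨rfl, rfl⟩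
          · refine myRepl_fix_no_adj '(' ')' u' t ?_
            have h1 := hirr.1; rwa [List.concat_append] at h1
          · refine myRepl_fix_no_adj '[' ']' u' t ?_
            have h1 := hirr.2.1; rwa [List.concat_append] at h1
          · refine myRepl_fix_no_adj '{' '}' u' t ?_
            have h1 := hirr.2.2.1; rwa [List.concat_append] at h1
          · refine myRepl_fix_no_adj '<' '>' u' t ?_
            have h1 := hirr.2.2.2; rwa [List.concat_append] at h1
        have : aStep (some (u'.concat a)) b = none := by
          simp [aStep, hb', List.concat_eq_append, hvst]
        rw [this, foldl_aStep_none]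

-- ===== VERDICT (by name: the statement is the Claim_ definition above) =====
theorem is_incomplete_spec : Claim_equal_is_incomplete := by
  intro line _
  unfold Spec_is_incomplete
  have hA : is_incomplete line =
      (match line.toList.foldl aStep (some []) with
        | none => false
        | some stack => decide (stack.length > 0)) := rfl
  have hB : is_incomplete_alt line =
      (decide ((reduceLoop (line.toList.length + 1) line.toList).length > 0) &&
        (reduceLoop (line.toList.length + 1) line.toList).all
          (fun c => "([{<".toList.contains c)) := rfl
  rw [hA, hB, show ("([{<".toList) = OPEN_CHAR from by decide]
  rw [← fold_reduceLoop (line.toList.length + 1) line.toList (some [])]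
  have h := irr_gen (reduceLoop (line.toList.length + 1) line.toList) [] (by simp)
    (by simpa using reduceLoop_fix (line.toList.length + 1) line.toList (Nat.lt_succ_self _))
  simpa using h
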